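-- pv_equiv track=rewrite | github.com/DenisLet/statixbet | app/graphs.py | analyze_teams
-- ===== SOURCE A (Python) =====
-- def check_goals(goals, team, since, till, goals_h2):
--     list_1 = []
--     list_2 = []
--     for i, j in enumerate(goals):
--         if not j:
--             continue
--         if since <= j[0] <= till:
--             list_1.append(1)
--             list_2.append(goals_h2[i])
--     return list_1, list_2
--
-- def analyze_teams(home_goals, away_goals, goals_h2, since1, till1, team1, since2, till2, team2):
--     list_1, list_2 = [], []
--
--     if team1 == 'team1' and not team2:
--         list_1, list_2 = check_goals(home_goals, team1, since1, till1, goals_h2)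
--     elif team1 == 'team2' and not team2:
--         list_1, list_2 = check_goals(away_goals, team1, since1, till1, goals_h2)
--     elif team1 == 'team1' and team2 == 'team1':
--         for i, j in enumerate(home_goals):
--             if len(j) < 2:
--                 continue
--             if since1 <= j[0] <= till1 and since2 <= j[1] <= till2:
--                 list_1.append(2)
--                 list_2.append(goals_h2[i])
--     elif team1 == 'team1' and team2 == 'team2':
--         for i, j in enumerate(home_goals):
--             if not j or not away_goals[i]:
--                 continue
--             if since1 <= j[0] <= till1 and since2 <= away_goals[i][0] <= till2:
--                 list_1.append(2)
--                 list_2.append(goals_h2[i])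
--     elif team1 == 'team2' and team2 == 'team1':
--         for i, j in enumerate(away_goals):
--             if not j or not home_goals[i]:
--                 continue
--             if since1 <= j[0] <= till1 and since2 <= home_goals[i][0] <= till2:
--                 list_1.append(2)
--                 list_2.append(goals_h2[i])
--     elif team1 == 'team2' and team2 == 'team2':
--         for i, j in enumerate(away_goals):
--             if len(j) < 2:
--                 continue
--             if since1 <= j[0] <= till1 and since2 <= j[1] <= till2:
--                 list_1.append(2)
--                 list_2.append(goals_h2[i])
--
--     return list_1, list_2
-- ===== SOURCE B (Python) =====
-- def _window_hits(vals, lo, hi):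
--     # index set of the values that exist and fall inside [lo, hi]
--     return {i for i, v in enumerate(vals) if v is not None and lo <= v <= hi}
--
-- def analyze_teams(home_goals, away_goals, goals_h2, since1, till1, team1, since2, till2, team2):
--     side = {'team1': home_goals, 'team2': away_goals}
--     if team1 not in side or (team2 and team2 not in side):
--         return [], []
--     primary = side[team1]
--     n = len(primary)
--     # Stage 1: extract per-match window-1 / window-2 candidate values (None = no candidate).
--     if not team2:
--         firsts, seconds, val = [j[0] if j else None for j in primary], None, 1
--     elif team2 == team1:
--         firsts = [j[0] if len(j) > 1 else None for j in primary]
--         seconds = [j[1] if len(j) > 1 else None for j in primary]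
--         val = 2
--     else:
--         other = side[team2]
--         firsts = [j[0] if j else None for j in primary]
--         seconds = [o[0] if o else None for _, o in zip(primary, other)]
--         seconds += [None] * (n - len(seconds))
--         val = 2
--     # Stage 2: one index set per window, intersect, gather in index order.
--     hits = _window_hits(firsts, since1, till1)
--     if seconds is not None:
--         hits &= _window_hits(seconds, since2, till2)
--     keep = sorted(hits)
--     return [val] * len(keep), [goals_h2[i] for i in keep]
-- ===== Notes on version B (the rewrite author's own statement) =====
-- stated objective: alternative
-- what changed: Instead of per-case guarded append loops, B stages the work: it first materializes per-match candidate-value lists (window-1 and optional window-2), computes one index SET per window, intersects the sets, sorts the surviving indices, and builds the outputs by replication and a gather over goals_h2.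
import Mathlib
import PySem

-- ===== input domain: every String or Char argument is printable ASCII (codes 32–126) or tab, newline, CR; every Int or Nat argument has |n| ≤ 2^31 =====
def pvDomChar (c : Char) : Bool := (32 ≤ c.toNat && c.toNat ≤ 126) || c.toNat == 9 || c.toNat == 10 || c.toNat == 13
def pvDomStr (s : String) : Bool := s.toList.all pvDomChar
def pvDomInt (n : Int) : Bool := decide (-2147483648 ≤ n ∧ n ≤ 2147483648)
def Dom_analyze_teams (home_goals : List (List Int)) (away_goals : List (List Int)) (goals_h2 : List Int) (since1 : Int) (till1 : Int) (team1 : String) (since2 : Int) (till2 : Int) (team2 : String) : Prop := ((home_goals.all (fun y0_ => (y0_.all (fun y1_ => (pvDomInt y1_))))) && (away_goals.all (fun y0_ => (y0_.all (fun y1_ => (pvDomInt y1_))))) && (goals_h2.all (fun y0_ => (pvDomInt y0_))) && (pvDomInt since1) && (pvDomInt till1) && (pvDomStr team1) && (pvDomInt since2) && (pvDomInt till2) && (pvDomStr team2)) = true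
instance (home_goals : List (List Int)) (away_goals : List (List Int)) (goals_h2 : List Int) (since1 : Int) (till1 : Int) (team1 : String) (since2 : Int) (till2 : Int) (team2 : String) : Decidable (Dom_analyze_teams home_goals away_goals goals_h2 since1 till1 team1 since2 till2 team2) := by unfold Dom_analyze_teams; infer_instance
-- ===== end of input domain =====

-- B replaces A's six guarded append loops by a staged pipeline: candidate-value lists per window,
-- one index set per window, set intersection, sort, then replicate/gather. Proved equal on Pre_.

-- ===== PORT A =====
def check_goals (goals : List (List Int)) (team : String) (since : Int) (till : Int) (goals_h2 : List Int) : List Int × List Int :=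
  (PySem.List.enumerate goals).foldl (fun (acc : List Int × List Int) (p : Int × List Int) =>
    if p.2 = [] then acc
    else if since ≤ p.2.getD 0 0 ∧ p.2.getD 0 0 ≤ till then
      (acc.1 ++ [1], acc.2 ++ [PySem.List.pyGetD goals_h2 p.1 0])
    else acc) ([], [])

def analyze_teams (home_goals : List (List Int)) (away_goals : List (List Int)) (goals_h2 : List Int) (since1 : Int) (till1 : Int) (team1 : String) (since2 : Int) (till2 : Int) (team2 : String) : List Int × List Int :=
  if team1 = "team1" ∧ team2 = "" then check_goals home_goals team1 since1 till1 goals_h2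
  else if team1 = "team2" ∧ team2 = "" then check_goals away_goals team1 since1 till1 goals_h2
  else if team1 = "team1" ∧ team2 = "team1" then
    (PySem.List.enumerate home_goals).foldl (fun (acc : List Int × List Int) (p : Int × List Int) =>
      if p.2.length < 2 then acc
      else if (since1 ≤ p.2.getD 0 0 ∧ p.2.getD 0 0 ≤ till1) ∧ (since2 ≤ p.2.getD 1 0 ∧ p.2.getD 1 0 ≤ till2) then
        (acc.1 ++ [2], acc.2 ++ [PySem.List.pyGetD goals_h2 p.1 0])
      else acc) ([], [])
  else if team1 = "team1" ∧ team2 = "team2" then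
    (PySem.List.enumerate home_goals).foldl (fun (acc : List Int × List Int) (p : Int × List Int) =>
      if p.2 = [] ∨ PySem.List.pyGetD away_goals p.1 [] = [] then acc
      else if (since1 ≤ p.2.getD 0 0 ∧ p.2.getD 0 0 ≤ till1) ∧
              (since2 ≤ (PySem.List.pyGetD away_goals p.1 []).getD 0 0 ∧ (PySem.List.pyGetD away_goals p.1 []).getD 0 0 ≤ till2) then
        (acc.1 ++ [2], acc.2 ++ [PySem.List.pyGetD goals_h2 p.1 0])
      else acc) ([], [])
  else if team1 = "team2" ∧ team2 = "team1" then
    (PySem.List.enumerate away_goals).foldl (fun (acc : List Int × List Int) (p : Int × List Int) =>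
      if p.2 = [] ∨ PySem.List.pyGetD home_goals p.1 [] = [] then acc
      else if (since1 ≤ p.2.getD 0 0 ∧ p.2.getD 0 0 ≤ till1) ∧
              (since2 ≤ (PySem.List.pyGetD home_goals p.1 []).getD 0 0 ∧ (PySem.List.pyGetD home_goals p.1 []).getD 0 0 ≤ till2) then
        (acc.1 ++ [2], acc.2 ++ [PySem.List.pyGetD goals_h2 p.1 0])
      else acc) ([], [])
  else if team1 = "team2" ∧ team2 = "team2" then
    (PySem.List.enumerate away_goals).foldl (fun (acc : List Int × List Int) (p : Int × List Int) =>
      if p.2.length < 2 then acc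
      else if (since1 ≤ p.2.getD 0 0 ∧ p.2.getD 0 0 ≤ till1) ∧ (since2 ≤ p.2.getD 1 0 ∧ p.2.getD 1 0 ≤ till2) then
        (acc.1 ++ [2], acc.2 ++ [PySem.List.pyGetD goals_h2 p.1 0])
      else acc) ([], [])
  else ([], [])

-- ===== PORT B =====
-- {i for i, v in enumerate(vals) if v is not None and lo <= v <= hi}
def pvWindowHits (vals : List (Option Int)) (lo hi : Int) : PySem.Set Int :=
  PySem.Set.ofList
    (((PySem.List.enumerate vals).filter (fun p =>
        match p.2 with
        | some v => decide (lo ≤ v) && decide (v ≤ hi)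
        | none => false)).map (·.1))

def analyze_teams_alt (home_goals : List (List Int)) (away_goals : List (List Int)) (goals_h2 : List Int) (since1 : Int) (till1 : Int) (team1 : String) (since2 : Int) (till2 : Int) (team2 : String) : List Int × List Int :=
  if ¬ (team1 = "team1" ∨ team1 = "team2") then ([], [])
  else if team2 ≠ "" ∧ ¬ (team2 = "team1" ∨ team2 = "team2") then ([], [])
  else
    let primary := if team1 = "team1" then home_goals else away_goals
    let n := primary.length
    -- stage 1: candidate-value lists (none = no candidate) and the append value
    let cfg : List (Option Int) × Option (List (Option Int)) × Int :=
      if team2 = "" then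
        (primary.map (fun j => if j = [] then none else some (j.getD 0 0)), none, 1)
      else if team2 = team1 then
        (primary.map (fun j => if 1 < j.length then some (j.getD 0 0) else none),
         some (primary.map (fun j => if 1 < j.length then some (j.getD 1 0) else none)), 2)
      else
        let other := if team2 = "team1" then home_goals else away_goals
        (primary.map (fun j => if j = [] then none else some (j.getD 0 0)),
         some (((primary.zip other).map (fun p => if p.2 = [] then none else some (p.2.getD 0 0)))
               ++ List.replicate (n - min n other.length) none), 2)
    -- stage 2: index set per window, intersection, sorted gather
    let hits1 := pvWindowHits cfg.1 since1 till1
    let hits := match cfg.2.1 with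
      | none => hits1
      | some s => PySem.Set.inter hits1 (pvWindowHits s since2 till2)
    let keep := PySem.List.sorted hits (fun x => x)
    (List.replicate keep.length cfg.2.2, keep.map (fun i => PySem.List.pyGetD goals_h2 i 0))

-- ===== PRECONDITION & SPEC =====
-- Pre_ excludes exactly the inputs where Python A raises IndexError: an index that passes
-- the guard and time-window checks but falls outside goals_h2 (or, in the cross cases,
-- outside the secondary list consulted by the guard itself).
def pvOkSingle (goals : List (List Int)) (gh2 : List Int) (s t : Int) : Bool :=
  (List.range goals.length).all fun i => decide ((goals.getD i [] ≠ [] ∧ s ≤ (goals.getD i []).getD 0 0 ∧ (goals.getD i []).getD 0 0 ≤ t) → i < gh2.length)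

def pvOkDouble (goals : List (List Int)) (gh2 : List Int) (s1 t1 s2 t2 : Int) : Bool :=
  (List.range goals.length).all fun i => decide ((2 ≤ (goals.getD i []).length ∧ s1 ≤ (goals.getD i []).getD 0 0 ∧ (goals.getD i []).getD 0 0 ≤ t1 ∧ s2 ≤ (goals.getD i []).getD 1 0 ∧ (goals.getD i []).getD 1 0 ≤ t2) → i < gh2.length)

def pvOkCross (goals other : List (List Int)) (gh2 : List Int) (s1 t1 s2 t2 : Int) : Bool :=
  (List.range goals.length).all fun i => decide ((goals.getD i [] ≠ [] → i < other.length) ∧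
    ((goals.getD i [] ≠ [] ∧ other.getD i [] ≠ [] ∧ s1 ≤ (goals.getD i []).getD 0 0 ∧ (goals.getD i []).getD 0 0 ≤ t1 ∧ s2 ≤ (other.getD i []).getD 0 0 ∧ (other.getD i []).getD 0 0 ≤ t2) → i < gh2.length))

def Pre_analyze_teams (home_goals : List (List Int)) (away_goals : List (List Int)) (goals_h2 : List Int) (since1 : Int) (till1 : Int) (team1 : String) (since2 : Int) (till2 : Int) (team2 : String) : Prop :=
  ((team1 = "team1" ∧ team2 = "") → pvOkSingle home_goals goals_h2 since1 till1 = true) ∧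
  ((team1 = "team2" ∧ team2 = "") → pvOkSingle away_goals goals_h2 since1 till1 = true) ∧
  ((team1 = "team1" ∧ team2 = "team1") → pvOkDouble home_goals goals_h2 since1 till1 since2 till2 = true) ∧
  ((team1 = "team1" ∧ team2 = "team2") → pvOkCross home_goals away_goals goals_h2 since1 till1 since2 till2 = true) ∧
  ((team1 = "team2" ∧ team2 = "team1") → pvOkCross away_goals home_goals goals_h2 since1 till1 since2 till2 = true) ∧
  ((team1 = "team2" ∧ team2 = "team2") → pvOkDouble away_goals goals_h2 since1 till1 since2 till2 = true)

instance (home_goals : List (List Int)) (away_goals : List (List Int)) (goals_h2 : List Int) (since1 : Int) (till1 : Int) (team1 : String) (since2 : Int) (till2 : Int) (team2 : String) : Decidable (Pre_analyze_teams home_goals away_goals goals_h2 since1 till1 team1 since2 till2 team2) := by unfold Pre_analyze_teams; infer_instance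

def pvWitness_analyze_teams : List (List Int) × List (List Int) × List Int × Int × Int × String × Int × Int × String :=
  ([[1], []], [[2]], [7, 8], 0, 2, "team1", 0, 0, "")

def Spec_analyze_teams (home_goals : List (List Int)) (away_goals : List (List Int)) (goals_h2 : List Int) (since1 : Int) (till1 : Int) (team1 : String) (since2 : Int) (till2 : Int) (team2 : String) (out : List Int × List Int) : Prop := out = analyze_teams_alt home_goals away_goals goals_h2 since1 till1 team1 since2 till2 team2
instance (home_goals : List (List Int)) (away_goals : List (List Int)) (goals_h2 : List Int) (since1 : Int) (till1 : Int) (team1 : String) (since2 : Int) (till2 : Int) (team2 : String) (out : List Int × List Int) : Decidable (Spec_analyze_teams home_goals away_goals goals_h2 since1 till1 team1 since2 till2 team2 out) := by unfold Spec_analyze_teams; infer_instance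

-- ===== CLAIM =====
def Claim_equal_analyze_teams : Prop := ∀ (home_goals : List (List Int)) (away_goals : List (List Int)) (goals_h2 : List Int) (since1 : Int) (till1 : Int) (team1 : String) (since2 : Int) (till2 : Int) (team2 : String), Dom_analyze_teams home_goals away_goals goals_h2 since1 till1 team1 since2 till2 team2 → Pre_analyze_teams home_goals away_goals goals_h2 since1 till1 team1 since2 till2 team2 → Spec_analyze_teams home_goals away_goals goals_h2 since1 till1 team1 since2 till2 team2 (analyze_teams home_goals away_goals goals_h2 since1 till1 team1 since2 till2 team2)

-- ===== LEMMAS AND PROOFS =====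
lemma pv_foldl_pair_if (P : Int × List Int → Bool) (v : Int) (g : Int → Int) (l : List (Int × List Int)) :
    l.foldl (fun (acc : List Int × List Int) p => if P p then (acc.1 ++ [v], acc.2 ++ [g p.1]) else acc) ([], [])
      = ((l.filter P).map (fun _ => v), (l.filter P).map (fun p => g p.1)) := by
  have h : (fun (acc : List Int × List Int) p => if P p then (acc.1 ++ [v], acc.2 ++ [g p.1]) else acc)
      = (fun (acc : List Int × List Int) p => (if P p then acc.1 ++ [v] else acc.1, if P p then acc.2 ++ [g p.1] else acc.2)) := by
    funext acc p; by_cases hp : P p <;> simp [hp]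
  rw [h, PySem.List.foldl_prod_mk (f := fun a p => if P p then a ++ [v] else a) (g := fun b p => if P p then b ++ [g p.1] else b),
      PySem.List.foldl_append_if, PySem.List.foldl_append_if]
  simp

lemma pv_enumerate_map {α β : Type} (f : α → β) (xs : List α) (s : Int) :
    PySem.List.enumerate (xs.map f) s = (PySem.List.enumerate xs s).map (fun p => (p.1, f p.2)) := by
  induction xs generalizing s with
  | nil => simp [PySem.List.enumerate_nil]
  | cons x xs ih => simp [PySem.List.enumerate_cons, ih]

lemma pv_fstFilter_map {α β : Type} (f : α → β) (Q : Int × β → Bool) (xs : List α) :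
    (((PySem.List.enumerate (xs.map f)).filter Q).map (·.1))
      = (((PySem.List.enumerate xs).filter (fun p => Q (p.1, f p.2))).map (·.1)) := by
  rw [pv_enumerate_map, List.filter_map, List.map_map]
  rfl

lemma pv_pairwise_fstFilter {α : Type} (Q : Int × α → Bool) (xs : List α) :
    (((PySem.List.enumerate xs).filter Q).map (·.1)).Pairwise (· < ·) := by
  have := (PySem.List.pairwise_lt_enumerate xs 0).filter Q
  exact this.map _ (fun a b hab => hab)

lemma pv_mem_fstFilter {α : Type} (xs : List α) (Q : Int × α → Bool) (k : Nat) (hk : k < xs.length) :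
    ((k : Int) ∈ ((PySem.List.enumerate xs).filter Q).map (·.1)) ↔ Q ((k : Int), xs[k]) = true := by
  simp only [List.mem_map, List.mem_filter, PySem.List.mem_enumerate_iff]
  constructor
  · rintro ⟨p, ⟨⟨m, hm, rfl⟩, hQ⟩, hfst⟩
    simp only [zero_add] at hfst hQ
    obtain rfl : m = k := by omega
    exact hQ
  · intro hQ
    exact ⟨((k:Int), xs[k]), ⟨⟨k, hk, by simp⟩, hQ⟩, rfl⟩

lemma pv_sorted_ofList (L : List Int) (h : L.Pairwise (· < ·)) :
    PySem.List.sorted (PySem.Set.ofList L) (fun x => x) = L := by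
  rw [PySem.Set.ofList_eq_self_of_nodup L (h.imp (fun hlt => Int.ne_of_lt hlt))]
  exact PySem.List.sorted_eq_of_perm_of_pairwise_lt L L _ (List.Perm.refl L) h

lemma pv_sorted_inter (L1 L2 : List Int) (h1 : L1.Pairwise (· < ·)) :
    PySem.List.sorted (PySem.Set.inter (PySem.Set.ofList L1) (PySem.Set.ofList L2)) (fun x => x)
      = L1.filter (fun x => decide (x ∈ L2)) := by
  have e : PySem.Set.inter (PySem.Set.ofList L1) (PySem.Set.ofList L2) = L1.filter (fun x => decide (x ∈ L2)) := by
    rw [PySem.Set.ofList_eq_self_of_nodup L1 (h1.imp (fun hlt => Int.ne_of_lt hlt))]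
    unfold PySem.Set.inter PySem.Set.contains
    apply List.filter_congr
    intro x _
    simp [PySem.Set.mem_ofList]
  rw [e]
  exact PySem.List.sorted_eq_of_perm_of_pairwise_lt _ _ _ (List.Perm.refl _) (h1.filter _)

lemma pv_case_single (xs : List (List Int)) (gh2 : List Int) (s t : Int) :
    (PySem.List.enumerate xs).foldl (fun (acc : List Int × List Int) p =>
      if p.2 = [] then acc
      else if s ≤ p.2.getD 0 0 ∧ p.2.getD 0 0 ≤ t then (acc.1 ++ [1], acc.2 ++ [PySem.List.pyGetD gh2 p.1 0]) else acc) ([], [])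
    = (List.replicate (PySem.List.sorted (pvWindowHits (xs.map (fun j => if j = [] then none else some (j.getD 0 0))) s t) (fun x => x)).length 1,
       (PySem.List.sorted (pvWindowHits (xs.map (fun j => if j = [] then none else some (j.getD 0 0))) s t) (fun x => x)).map (fun i => PySem.List.pyGetD gh2 i 0)) := by
  have hstep : (fun (acc : List Int × List Int) p =>
      if p.2 = [] then acc
      else if s ≤ p.2.getD 0 0 ∧ p.2.getD 0 0 ≤ t then (acc.1 ++ [1], acc.2 ++ [PySem.List.pyGetD gh2 p.1 0]) else acc)
    = (fun (acc : List Int × List Int) p =>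
        if (fun (q : Int × List Int) => (match (if q.2 = [] then none else some (q.2.getD 0 0)) with
            | some v => decide (s ≤ v) && decide (v ≤ t) | none => false)) p
        then (acc.1 ++ [1], acc.2 ++ [PySem.List.pyGetD gh2 p.1 0]) else acc) := by
    funext acc p
    by_cases h : p.2 = [] <;> by_cases h2 : (s ≤ p.2.getD 0 0 ∧ p.2.getD 0 0 ≤ t) <;>
      simp [h, h2]
  rw [hstep, pv_foldl_pair_if (P := fun (q : Int × List Int) => (match (if q.2 = [] then none else some (q.2.getD 0 0)) with
      | some v => decide (s ≤ v) && decide (v ≤ t) | none => false)) 1 (fun i => PySem.List.pyGetD gh2 i 0)]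
  unfold pvWindowHits
  rw [pv_fstFilter_map, pv_sorted_ofList _ (pv_pairwise_fstFilter _ _)]
  simp [List.map_map, List.map_const']

lemma pv_filter_mem_congr {α : Type} {xs : List α} {Q1 Q2 : Int × α → Bool} :
    (List.filter (fun a => decide (a.1 ∈ ((PySem.List.enumerate xs).filter Q2).map (·.1)) && Q1 a) (PySem.List.enumerate xs))
      = List.filter (fun a => Q2 a && Q1 a) (PySem.List.enumerate xs) := by
  apply List.filter_congr
  intro p hp
  rw [PySem.List.mem_enumerate_iff] at hp
  obtain ⟨m, hm, rfl⟩ := hp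
  simp only [zero_add]
  have h2 := pv_mem_fstFilter xs Q2 m hm
  congr 1
  rw [Bool.eq_iff_iff]
  simp [h2]

lemma pv_case_double (xs : List (List Int)) (gh2 : List Int) (s1 t1 s2 t2 : Int) :
    (PySem.List.enumerate xs).foldl (fun (acc : List Int × List Int) p =>
      if p.2.length < 2 then acc
      else if (s1 ≤ p.2.getD 0 0 ∧ p.2.getD 0 0 ≤ t1) ∧ (s2 ≤ p.2.getD 1 0 ∧ p.2.getD 1 0 ≤ t2) then
        (acc.1 ++ [2], acc.2 ++ [PySem.List.pyGetD gh2 p.1 0])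
      else acc) ([], [])
    = (List.replicate (PySem.List.sorted (PySem.Set.inter
          (pvWindowHits (xs.map (fun j => if 1 < j.length then some (j.getD 0 0) else none)) s1 t1)
          (pvWindowHits (xs.map (fun j => if 1 < j.length then some (j.getD 1 0) else none)) s2 t2)) (fun x => x)).length 2,
       (PySem.List.sorted (PySem.Set.inter
          (pvWindowHits (xs.map (fun j => if 1 < j.length then some (j.getD 0 0) else none)) s1 t1)
          (pvWindowHits (xs.map (fun j => if 1 < j.length then some (j.getD 1 0) else none)) s2 t2)) (fun x => x)).map (fun i => PySem.List.pyGetD gh2 i 0)) := by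
  have hstep : (fun (acc : List Int × List Int) p =>
      if p.2.length < 2 then acc
      else if (s1 ≤ p.2.getD 0 0 ∧ p.2.getD 0 0 ≤ t1) ∧ (s2 ≤ p.2.getD 1 0 ∧ p.2.getD 1 0 ≤ t2) then
        (acc.1 ++ [2], acc.2 ++ [PySem.List.pyGetD gh2 p.1 0])
      else acc)
    = (fun (acc : List Int × List Int) p =>
        if (fun (q : Int × List Int) =>
             ((match (if 1 < q.2.length then some (q.2.getD 1 0) else none) with
               | some v => decide (s2 ≤ v) && decide (v ≤ t2) | none => false) &&
              (match (if 1 < q.2.length then some (q.2.getD 0 0) else none) with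
               | some v => decide (s1 ≤ v) && decide (v ≤ t1) | none => false))) p
        then (acc.1 ++ [2], acc.2 ++ [PySem.List.pyGetD gh2 p.1 0]) else acc) := by
    funext acc p
    by_cases h1 : 1 < p.2.length
    · have hl : ¬ p.2.length < 2 := by omega
      simp [hl, h1]
      split_ifs <;> first | rfl | (exfalso; tauto)
    · have hl : p.2.length < 2 := by omega
      simp [hl, h1]
  rw [hstep, pv_foldl_pair_if (P := fun (q : Int × List Int) =>
        ((match (if 1 < q.2.length then some (q.2.getD 1 0) else none) with
          | some v => decide (s2 ≤ v) && decide (v ≤ t2) | none => false) &&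
         (match (if 1 < q.2.length then some (q.2.getD 0 0) else none) with
          | some v => decide (s1 ≤ v) && decide (v ≤ t1) | none => false))) 2 (fun i => PySem.List.pyGetD gh2 i 0)]
  unfold pvWindowHits
  rw [pv_fstFilter_map, pv_fstFilter_map, pv_sorted_inter _ _ (pv_pairwise_fstFilter _ _)]
  rw [List.filter_map, List.filter_filter]
  simp only [Function.comp_def]
  rw [pv_filter_mem_congr]
  simp [List.map_map, List.map_const']

lemma pv_filter_mem_general {α β : Type} (xs : List α) (S : List β) (Q1 C2 : Int × α → Bool) (Q2 : Int × β → Bool)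
    (h : ∀ (m : Nat) (hm : m < xs.length),
      decide ((m : Int) ∈ ((PySem.List.enumerate S).filter Q2).map (·.1)) = C2 ((m : Int), xs[m])) :
    List.filter (fun a => decide (a.1 ∈ ((PySem.List.enumerate S).filter Q2).map (·.1)) && Q1 a) (PySem.List.enumerate xs)
      = List.filter (fun a => C2 a && Q1 a) (PySem.List.enumerate xs) := by
  apply List.filter_congr
  intro p hp
  rw [PySem.List.mem_enumerate_iff] at hp
  obtain ⟨m, hm, rfl⟩ := hp
  simp only [zero_add]
  congr 1
  exact h m hm

lemma pv_case_cross (xs other : List (List Int)) (gh2 : List Int) (s1 t1 s2 t2 : Int) :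
    (PySem.List.enumerate xs).foldl (fun (acc : List Int × List Int) p =>
      if p.2 = [] ∨ PySem.List.pyGetD other p.1 [] = [] then acc
      else if (s1 ≤ p.2.getD 0 0 ∧ p.2.getD 0 0 ≤ t1) ∧
              (s2 ≤ (PySem.List.pyGetD other p.1 []).getD 0 0 ∧ (PySem.List.pyGetD other p.1 []).getD 0 0 ≤ t2) then
        (acc.1 ++ [2], acc.2 ++ [PySem.List.pyGetD gh2 p.1 0])
      else acc) ([], [])
    = (List.replicate (PySem.List.sorted (PySem.Set.inter
          (pvWindowHits (xs.map (fun j => if j = [] then none else some (j.getD 0 0))) s1 t1)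
          (pvWindowHits (((xs.zip other).map (fun (p : List Int × List Int) => if p.2 = [] then none else some (p.2.getD 0 0)))
               ++ List.replicate (xs.length - min xs.length other.length) none) s2 t2)) (fun x => x)).length 2,
       (PySem.List.sorted (PySem.Set.inter
          (pvWindowHits (xs.map (fun j => if j = [] then none else some (j.getD 0 0))) s1 t1)
          (pvWindowHits (((xs.zip other).map (fun (p : List Int × List Int) => if p.2 = [] then none else some (p.2.getD 0 0)))
               ++ List.replicate (xs.length - min xs.length other.length) none) s2 t2)) (fun x => x)).map (fun i => PySem.List.pyGetD gh2 i 0)) := by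
  have hstep : (fun (acc : List Int × List Int) p =>
      if p.2 = [] ∨ PySem.List.pyGetD other p.1 [] = [] then acc
      else if (s1 ≤ p.2.getD 0 0 ∧ p.2.getD 0 0 ≤ t1) ∧
              (s2 ≤ (PySem.List.pyGetD other p.1 []).getD 0 0 ∧ (PySem.List.pyGetD other p.1 []).getD 0 0 ≤ t2) then
        (acc.1 ++ [2], acc.2 ++ [PySem.List.pyGetD gh2 p.1 0])
      else acc)
    = (fun (acc : List Int × List Int) p =>
        if (fun (q : Int × List Int) =>
             ((match (if PySem.List.pyGetD other q.1 [] = [] then none else some ((PySem.List.pyGetD other q.1 []).getD 0 0)) with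
               | some v => decide (s2 ≤ v) && decide (v ≤ t2) | none => false) &&
              (match (if q.2 = [] then none else some (q.2.getD 0 0)) with
               | some v => decide (s1 ≤ v) && decide (v ≤ t1) | none => false))) p
        then (acc.1 ++ [2], acc.2 ++ [PySem.List.pyGetD gh2 p.1 0]) else acc) := by
    funext acc p
    by_cases h1 : p.2 = [] <;> by_cases h2 : PySem.List.pyGetD other p.1 [] = [] <;>
      simp [h1, h2] <;> split_ifs <;> first | rfl | (exfalso; tauto)
  rw [hstep, pv_foldl_pair_if (P := fun (q : Int × List Int) =>
        ((match (if PySem.List.pyGetD other q.1 [] = [] then none else some ((PySem.List.pyGetD other q.1 []).getD 0 0)) with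
          | some v => decide (s2 ≤ v) && decide (v ≤ t2) | none => false) &&
         (match (if q.2 = [] then none else some (q.2.getD 0 0)) with
          | some v => decide (s1 ≤ v) && decide (v ≤ t1) | none => false))) 2 (fun i => PySem.List.pyGetD gh2 i 0)]
  unfold pvWindowHits
  rw [pv_fstFilter_map, pv_sorted_inter _ _ (pv_pairwise_fstFilter _ _)]
  rw [List.filter_map, List.filter_filter]
  simp only [Function.comp_def]
  rw [pv_filter_mem_general (xs := xs)
      (S := ((xs.zip other).map (fun (p : List Int × List Int) => if p.2 = [] then none else some (p.2.getD 0 0)))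
            ++ List.replicate (xs.length - min xs.length other.length) none)
      (C2 := fun q =>
        (match (if PySem.List.pyGetD other q.1 [] = [] then none else some ((PySem.List.pyGetD other q.1 []).getD 0 0)) with
          | some v => decide (s2 ≤ v) && decide (v ≤ t2) | none => false))
      (h := by
        intro m hm
        have hS : (((xs.zip other).map (fun (p : List Int × List Int) => if p.2 = [] then none else some (p.2.getD 0 0)))
            ++ List.replicate (xs.length - min xs.length other.length) none).length = xs.length := by
          simp [List.length_zip]
        have hmS : m < (((xs.zip other).map (fun (p : List Int × List Int) => if p.2 = [] then none else some (p.2.getD 0 0)))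
            ++ List.replicate (xs.length - min xs.length other.length) none).length := by omega
        rw [Bool.eq_iff_iff]
        rw [decide_eq_true_iff, pv_mem_fstFilter _ _ m hmS]
        by_cases ml : m < other.length
        · have hz : m < ((xs.zip other).map (fun (p : List Int × List Int) => if p.2 = [] then none else some (p.2.getD 0 0))).length := by
            simp [List.length_zip]; omega
          rw [List.getElem_append_left hz, List.getElem_map, List.getElem_zip]
          simp only []
          rw [PySem.List.pyGetD_natCast, List.getD_eq_getElem other [] ml]
        · have hle : ((xs.zip other).map (fun (p : List Int × List Int) => if p.2 = [] then none else some (p.2.getD 0 0))).length ≤ m := by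
            simp [List.length_zip]; omega
          rw [List.getElem_append_right hle, List.getElem_replicate]
          simp only []
          rw [PySem.List.pyGetD_natCast, List.getD_eq_default]
          · simp
          · omega)]
  simp [List.map_map, List.map_const']

-- ===== VERDICT =====
theorem analyze_teams_spec : Claim_equal_analyze_teams := by
  intro hg ag gh2 s1 t1 team1 s2 t2 team2 _ _
  unfold Spec_analyze_teams analyze_teams analyze_teams_alt check_goals
  by_cases h1 : team1 = "team1" ∧ team2 = ""
  · obtain ⟨e1, e2⟩ := h1; subst e1; subst e2
    simp only [String.reduceEq, reduceIte, and_true, true_and, and_false, false_and, not_false_eq_true, not_true_eq_false, ne_eq, or_true, true_or, or_false, false_or, ite_true, ite_false]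
    rw [pv_case_single]
  · by_cases h2 : team1 = "team2" ∧ team2 = ""
    · obtain ⟨e1, e2⟩ := h2; subst e1; subst e2
      simp only [String.reduceEq, reduceIte, and_true, true_and, and_false, false_and, not_false_eq_true, not_true_eq_false, ne_eq, or_true, true_or, or_false, false_or, ite_true, ite_false]
      rw [pv_case_single]
    · by_cases h3 : team1 = "team1" ∧ team2 = "team1"
      · obtain ⟨e1, e2⟩ := h3; subst e1; subst e2
        simp only [String.reduceEq, reduceIte, and_true, true_and, and_false, false_and, not_false_eq_true, not_true_eq_false, ne_eq, or_true, true_or, or_false, false_or, ite_true, ite_false]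
        rw [pv_case_double]
      · by_cases h4 : team1 = "team1" ∧ team2 = "team2"
        · obtain ⟨e1, e2⟩ := h4; subst e1; subst e2
          simp only [String.reduceEq, reduceIte, and_true, true_and, and_false, false_and, not_false_eq_true, not_true_eq_false, ne_eq, or_true, true_or, or_false, false_or, ite_true, ite_false]
          rw [pv_case_cross]
        · by_cases h5 : team1 = "team2" ∧ team2 = "team1"
          · obtain ⟨e1, e2⟩ := h5; subst e1; subst e2
            simp only [String.reduceEq, reduceIte, and_true, true_and, and_false, false_and, not_false_eq_true, not_true_eq_false, ne_eq, or_true, true_or, or_false, false_or, ite_true, ite_false]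
            rw [pv_case_cross]
          · by_cases h6 : team1 = "team2" ∧ team2 = "team2"
            · obtain ⟨e1, e2⟩ := h6; subst e1; subst e2
              simp only [String.reduceEq, reduceIte, and_true, true_and, and_false, false_and, not_false_eq_true, not_true_eq_false, ne_eq, or_true, true_or, or_false, false_or, ite_true, ite_false]
              rw [pv_case_double]
            · simp only [if_neg h1, if_neg h2, if_neg h3, if_neg h4, if_neg h5, if_neg h6]
              by_cases hta : team1 = "team1" ∨ team1 = "team2"
              · have htb : ¬ (team2 = "" ∨ team2 = "team1" ∨ team2 = "team2") := by
                  rintro (e | e | e) <;> rcases hta with a | a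
                  · exact h1 ⟨a, e⟩
                  · exact h2 ⟨a, e⟩
                  · exact h3 ⟨a, e⟩
                  · exact h5 ⟨a, e⟩
                  · exact h4 ⟨a, e⟩
                  · exact h6 ⟨a, e⟩
                rw [if_neg (not_not_intro hta), if_pos ⟨fun e => htb (Or.inl e), fun d => htb (Or.inr d)⟩]
              · rw [if_pos hta]
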